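-- pv_equiv track=rewrite | github.com/secure-foundations/SWISS | src/driver.py | unpack_args
-- ===== SOURCE A (Python) =====
-- def unpack_args(args):
--   main_args = []
--   iter_arg_lists = []
--   li = None
--   for arg in args:
--     assert arg != "--incremental"
--     if arg in ("--finisher", "--breadth"):
--       if li != None:
--         iter_arg_lists.append(li)
--       li = []
--       li.append(arg)
--     else:
--       if li == None:
--         main_args.append(arg)
--       else:
--         li.append(arg)
--   assert li != None
--   iter_arg_lists.append(li)
--   return (main_args, iter_arg_lists)
-- ===== SOURCE B (Python) =====
-- def unpack_args(args):
--   assert "--incremental" not in args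
--   idxs = [i for i, a in enumerate(args) if a in ("--finisher", "--breadth")]
--   assert idxs
--   main_args = args[:idxs[0]]
--   iter_arg_lists = [args[i:j] for i, j in zip(idxs, idxs[1:] + [len(args)])]
--   return (main_args, iter_arg_lists)
-- ===== Notes on version B (the rewrite author's own statement) =====
-- stated objective: alternative
-- what changed: Replaces the stateful single pass with an Option accumulator by an index-then-slice decomposition: collect the delimiter positions once, then cut the list into main prefix and groups with slices.
import Mathlib
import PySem

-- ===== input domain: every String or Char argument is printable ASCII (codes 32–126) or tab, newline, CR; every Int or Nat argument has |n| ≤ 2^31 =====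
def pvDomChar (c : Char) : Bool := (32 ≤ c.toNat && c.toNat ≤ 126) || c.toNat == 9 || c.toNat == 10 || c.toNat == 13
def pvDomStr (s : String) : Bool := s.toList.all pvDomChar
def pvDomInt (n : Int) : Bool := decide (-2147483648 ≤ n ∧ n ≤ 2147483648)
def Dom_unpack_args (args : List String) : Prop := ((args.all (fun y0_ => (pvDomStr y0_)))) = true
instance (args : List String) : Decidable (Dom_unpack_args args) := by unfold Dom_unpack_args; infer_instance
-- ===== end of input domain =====

-- B replaces A's stateful single pass (Option accumulator) by an index-then-slice decomposition; alternative, not claimed faster.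


-- ===== PORT A =====
-- literal transliteration: fold over args keeping (main_args, iter_arg_lists, li);
-- the asserts are excluded by Pre_unpack_args, so the `none` finalization branch is unreachable there
def unpack_args (args : List String) : List String × List (List String) :=
  let st := args.foldl
    (fun (st : List String × List (List String) × Option (List String)) arg =>
      let (main, iters, li) := st
      if arg == "--finisher" || arg == "--breadth" then
        match li with
        | some l => (main, iters ++ [l], some [arg])
        | none   => (main, iters, some [arg])
      else
        match li with
        | none   => (main ++ [arg], iters, none)
        | some l => (main, iters, some (l ++ [arg])))
    ([], [], none)
  match st.2.2 with
  | some l => (st.1, st.2.1 ++ [l])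
  | none   => (st.1, st.2.1)

-- ===== PORT B =====
-- literal transliteration of Source B: delimiter indices via enumerate, then slices
def unpack_args_alt (args : List String) : List String × List (List String) :=
  let idxs := (PySem.List.enumerate args).filterMap
    (fun p => if p.2 == "--finisher" || p.2 == "--breadth" then some p.1 else none)
  match idxs with
  | [] => ([], [])   -- Python: `assert idxs` raises here; excluded by Pre_unpack_args
  | i0 :: rest =>
    (PySem.List.slice args none (some i0),
     ((i0 :: rest).zip (rest ++ [(args.length : Int)])).map
       (fun p => PySem.List.slice args (some p.1) (some p.2)))

-- ===== PRECONDITION & SPEC =====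
-- Pre_ excludes exactly the inputs on which A raises AssertionError:
-- those containing "--incremental" and those with no "--finisher"/"--breadth" element.
def Pre_unpack_args (args : List String) : Prop :=
  "--incremental" ∉ args ∧ (args.any (fun a => a == "--finisher" || a == "--breadth")) = true
instance (args : List String) : Decidable (Pre_unpack_args args) := by unfold Pre_unpack_args; infer_instance
def pvWitness_unpack_args : List String := ["x", "--finisher", "y", "--breadth"]
def Spec_unpack_args (args : List String) (out : List String × List (List String)) : Prop := out = unpack_args_alt args
instance (args : List String) (out : List String × List (List String)) : Decidable (Spec_unpack_args args out) := by unfold Spec_unpack_args; infer_instance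

-- ===== CLAIM (what is proved, stated in full; the proofs are below) =====
def Claim_equal_unpack_args : Prop := ∀ (args : List String), Dom_unpack_args args → Pre_unpack_args args → Spec_unpack_args args (unpack_args args)

-- ===== LEMMAS AND PROOFS =====

def isDelim (a : String) : Bool := a == "--finisher" || a == "--breadth"

-- A's loop body, named for the proofs
def stepA (st : List String × List (List String) × Option (List String)) (arg : String) :
    List String × List (List String) × Option (List String) :=
  let (main, iters, li) := st
  if arg == "--finisher" || arg == "--breadth" then
    match li with
    | some l => (main, iters ++ [l], some [arg])
    | none   => (main, iters, some [arg])
  else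
    match li with
    | none   => (main ++ [arg], iters, none)
    | some l => (main, iters, some (l ++ [arg]))

-- A's finalization
def finA (st : List String × List (List String) × Option (List String)) :
    List String × List (List String) :=
  match st.2.2 with
  | some l => (st.1, st.2.1 ++ [l])
  | none   => (st.1, st.2.1)

theorem unpack_args_eq_finA (args : List String) :
    unpack_args args = finA (args.foldl stepA ([], [], none)) := rfl

-- reference grouping: remaining input t, current open group acc
def grp : List String → List String → List (List String)
  | [], acc => [acc]
  | a :: t, acc => if isDelim a then acc :: grp t [a] else grp t (acc ++ [a])

-- delimiter indices of u, absolute offset s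
def dIdx : List String → Nat → List Nat
  | [], _ => []
  | a :: t, s => if isDelim a then s :: dIdx t (s+1) else dIdx t (s+1)

-- Nat-indexed version of B's zip-of-slices
def zipSl (full : List String) (is : List Nat) (n : Nat) : List (List String) :=
  (is.zip (is.tail ++ [n])).map (fun p => (full.drop p.1).take (p.2 - p.1))

theorem foldA_none (pre : List String) (m : List String) (its : List (List String))
    (h : ∀ a ∈ pre, isDelim a = false) :
    pre.foldl stepA (m, its, none) = (m ++ pre, its, none) := by
  induction pre generalizing m with
  | nil => simp
  | cons a t ih =>
    have ha : isDelim a = false := h a (by simp)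
    simp only [List.foldl_cons, stepA]
    rw [if_neg (by simpa [isDelim] using ha)]
    rw [ih (m ++ [a]) (fun x hx => h x (by simp [hx]))]
    simp

theorem foldA_some (t : List String) (m : List String) (its : List (List String))
    (acc : List String) :
    finA (t.foldl stepA (m, its, some acc)) = (m, its ++ grp t acc) := by
  induction t generalizing its acc with
  | nil => simp [finA, grp]
  | cons a t ih =>
    by_cases h : isDelim a = true
    · simp only [List.foldl_cons, stepA]
      rw [if_pos (by simpa [isDelim] using h)]
      rw [ih (its ++ [acc]) [a]]
      simp [grp, h]
    · simp only [List.foldl_cons, stepA]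
      rw [if_neg (by simpa [isDelim] using h)]
      rw [ih its (acc ++ [a])]
      simp [grp, h]

theorem enum_filterMap (u : List String) (s : Nat) :
    (PySem.List.enumerate u (s : Int)).filterMap
      (fun p => if p.2 == "--finisher" || p.2 == "--breadth" then some p.1 else none)
    = (dIdx u s).map (fun k => Int.ofNat k) := by
  induction u generalizing s with
  | nil => simp [PySem.List.enumerate_nil, dIdx]
  | cons a t ih =>
    rw [PySem.List.enumerate_cons]
    by_cases h : isDelim a = true
    · simp only [List.filterMap_cons]
      rw [if_pos (by simpa [isDelim] using h)]
      have : ((s : Int) + 1) = ((s + 1 : Nat) : Int) := by push_cast; ring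
      rw [this, ih (s + 1)]
      simp [dIdx, h]
    · simp only [List.filterMap_cons]
      rw [if_neg (by simpa [isDelim] using h)]
      have : ((s : Int) + 1) = ((s + 1 : Nat) : Int) := by push_cast; ring
      rw [this, ih (s + 1)]
      simp [dIdx, h]

theorem zip_cast (full : List String) (is : List Nat) (n : Nat) :
    ((is.map (fun k : Nat => Int.ofNat k)).zip
      ((is.map (fun k : Nat => Int.ofNat k)).tail ++ [(n : Int)])).map
      (fun p => PySem.List.slice full (some p.1) (some p.2)) = zipSl full is n := by
  induction is with
  | nil => simp [zipSl]
  | cons i is ih =>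
    cases is with
    | nil =>
      simp only [List.map_cons, List.map_nil, List.tail_cons, List.nil_append,
        List.zip_cons_cons, List.zip_nil_right]
      rw [show Int.ofNat i = ((i : Nat) : Int) from rfl, PySem.List.slice_natCast]
      simp [zipSl]
    | cons j r =>
      simp only [List.map_cons, List.tail_cons, List.zip_cons_cons, List.cons_append] at ih ⊢
      rw [show Int.ofNat j = ((j : Nat) : Int) from rfl] at ih
      rw [show Int.ofNat i = ((i : Nat) : Int) from rfl,
        show Int.ofNat j = ((j : Nat) : Int) from rfl,
        PySem.List.slice_natCast, ih]
      simp [zipSl]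

theorem zipSl_single (full : List String) (p n : Nat) :
    zipSl full [p] n = [(full.drop p).take (n - p)] := by simp [zipSl]

theorem zipSl_cons (full : List String) (p j : Nat) (r : List Nat) (n : Nat) :
    zipSl full (p :: j :: r) n = (full.drop p).take (j - p) :: zipSl full (j :: r) n := by
  simp [zipSl]

theorem zipSl_grp (full : List String) (t acc : List String) (p : Nat)
    (h : full.drop p = acc ++ t) :
    zipSl full (p :: dIdx t (p + acc.length)) full.length = grp t acc := by
  induction t generalizing acc p with
  | nil =>
    rw [dIdx, zipSl_single, grp]
    have hlen : (full.drop p).length = full.length - p := List.length_drop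
    rw [h] at hlen; simp at h hlen
    rw [h, List.take_of_length_le (by omega)]
  | cons a t ih =>
    by_cases hd : isDelim a = true
    · rw [dIdx, if_pos hd, zipSl_cons, grp, if_pos hd]
      have h1 : (full.drop p).take ((p + acc.length) - p) = acc := by
        rw [h]; simp
      have h2 : full.drop (p + acc.length) = [a] ++ t := by
        rw [← List.drop_drop, h, List.drop_left]; rfl
      have := ih [a] (p + acc.length) h2
      simp only [List.length_cons, List.length_nil] at this
      rw [h1, ← this]
    · rw [dIdx, if_neg hd, grp, if_neg hd]
      have h2 : full.drop p = (acc ++ [a]) ++ t := by rw [h]; simp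
      have := ih (acc ++ [a]) p h2
      rw [← this]
      congr 3
      simp; omega

theorem dIdx_append_free (pre v : List String) (s : Nat)
    (h : ∀ a ∈ pre, isDelim a = false) :
    dIdx (pre ++ v) s = dIdx v (s + pre.length) := by
  induction pre generalizing s with
  | nil => simp
  | cons a t ih =>
    have ha : isDelim a = false := h a (by simp)
    rw [List.cons_append, dIdx, if_neg (by simp [ha])]
    rw [ih (s + 1) (fun x hx => h x (by simp [hx]))]
    congr 1
    simp; omega

theorem unpack_args_spec : Claim_equal_unpack_args := by
  intro args _hdom hpre
  obtain ⟨_hinc, hany⟩ := hpre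
  -- split args at the first delimiter
  set nd : String → Bool := fun a => !(a == "--finisher" || a == "--breadth") with hnd
  have hsplit : args.takeWhile nd ++ args.dropWhile nd = args := List.takeWhile_append_dropWhile
  set pre := args.takeWhile nd with hpreDef
  set suf := args.dropWhile nd with hsufDef
  have hsufne : suf ≠ [] := by
    intro hnil
    rw [hnil, List.append_nil] at hsplit
    rw [List.any_eq_true] at hany
    obtain ⟨x, hx, hxd⟩ := hany
    rw [← hsplit] at hx
    have := List.mem_takeWhile_imp hx
    rw [hnd] at this
    simp at this
    simp [this.1, this.2] at hxd
  obtain ⟨d, rest, hsuf⟩ := List.exists_cons_of_ne_nil hsufne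
  have hd : isDelim d = true := by
    have h0 := List.head?_dropWhile_not nd args
    rw [← hsufDef, hsuf] at h0
    simp at h0
    rw [isDelim]
    by_contra hc
    simp at hc
    simp [hnd, hc.1, hc.2] at h0
  have hpref : ∀ a ∈ pre, isDelim a = false := by
    intro a ha
    have := List.mem_takeWhile_imp ha
    rw [hnd] at this
    simp at this
    simp [isDelim, this.1, this.2]
  have hargs : args = pre ++ d :: rest := by rw [← hsplit, hsuf]
  -- A's side
  have hA : unpack_args args = (pre, grp rest [d]) := by
    rw [unpack_args_eq_finA]
    conv_lhs => rw [hargs]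
    rw [List.foldl_append, foldA_none pre [] [] hpref, List.foldl_cons]
    have hstep : stepA (([] : List String) ++ pre, ([] : List (List String)), none) d
        = (pre, [], some [d]) := by
      rw [stepA]
      simp only [List.nil_append]
      rw [if_pos (by simpa [isDelim] using hd)]
    rw [hstep, foldA_some]
    simp
  -- B's side
  have hidx : dIdx args 0 = pre.length :: dIdx rest (pre.length + 1) := by
    rw [hargs, dIdx_append_free pre _ 0 hpref]
    simp [dIdx, hd]
  have hB : unpack_args_alt args = (pre, grp rest [d]) := by
    rw [unpack_args_alt]
    have he : (PySem.List.enumerate args 0).filterMap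
        (fun p => if p.2 == "--finisher" || p.2 == "--breadth" then some p.1 else none)
        = (dIdx args 0).map (fun k => Int.ofNat k) := by
      have := enum_filterMap args 0
      simpa using this
    rw [he, hidx]
    simp only [List.map_cons]
    have hmain : PySem.List.slice args none (some (Int.ofNat pre.length)) = pre := by
      rw [show Int.ofNat pre.length = ((pre.length : Nat) : Int) from rfl,
        PySem.List.slice_to_natCast, hargs, List.take_left]
    have hz := zip_cast args (pre.length :: dIdx rest (pre.length + 1)) args.length
    simp only [List.map_cons, List.tail_cons] at hz
    rw [hz]
    have hdrop : args.drop pre.length = [d] ++ rest := by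
      rw [hargs, List.drop_left]; rfl
    have hg := zipSl_grp args rest [d] pre.length hdrop
    simp only [List.length_cons, List.length_nil] at hg
    rw [show pre.length + (0 + 1) = pre.length + 1 from by omega] at hg
    rw [hmain, hg]
  rw [Spec_unpack_args, hA, hB]
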